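-- pv_equiv track=rewrite | github.com/Romathonat/RocketLeagueSkillsDetection | seqehc/utils.py | subsequence_indices
-- ===== SOURCE A (Python) =====
-- def subsequence_indices(a, b):
--     """ Return itemset indices of b that itemset of a are included in
--         Precondition: a is a subset of b
--     """
--     index_b_mem = 0
--     indices_b = []
--     for index_a, itemset_a in enumerate(a):
--         for index_b in range(index_b_mem, len(b)):
--             if index_b == len(b) - 1:
--                 # we mark as finished
--                 index_b_mem = len(b)
--
--             itemset_b = b[index_b]
--
--             if itemset_a.issubset(itemset_b):
--                 indices_b.append(index_b)
--                 index_b_mem = index_b + 1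
--                 break
--
--         if index_b_mem == len(b):
--             return indices_b
--
--     return indices_b
-- ===== SOURCE B (Python) =====
-- def subsequence_indices(a, b):
--     """ Return itemset indices of b that itemset of a are included in
--         Precondition: a is a subset of b
--     """
--     indices_b = []
--     ai = 0
--     for index_b, itemset_b in enumerate(b):
--         if ai >= len(a):
--             break
--         if a[ai].issubset(itemset_b):
--             indices_b.append(index_b)
--             ai += 1
--     return indices_b
-- ===== Notes on version B (the rewrite author's own statement) =====
-- stated objective: simpler
-- what changed: Replaced A's outer loop over a with an inner index scan over b (plus a mutable resume marker and an early-return check) by a single enumerate sweep over b that advances a pointer into a, appending the index on each match.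
import Mathlib
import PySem

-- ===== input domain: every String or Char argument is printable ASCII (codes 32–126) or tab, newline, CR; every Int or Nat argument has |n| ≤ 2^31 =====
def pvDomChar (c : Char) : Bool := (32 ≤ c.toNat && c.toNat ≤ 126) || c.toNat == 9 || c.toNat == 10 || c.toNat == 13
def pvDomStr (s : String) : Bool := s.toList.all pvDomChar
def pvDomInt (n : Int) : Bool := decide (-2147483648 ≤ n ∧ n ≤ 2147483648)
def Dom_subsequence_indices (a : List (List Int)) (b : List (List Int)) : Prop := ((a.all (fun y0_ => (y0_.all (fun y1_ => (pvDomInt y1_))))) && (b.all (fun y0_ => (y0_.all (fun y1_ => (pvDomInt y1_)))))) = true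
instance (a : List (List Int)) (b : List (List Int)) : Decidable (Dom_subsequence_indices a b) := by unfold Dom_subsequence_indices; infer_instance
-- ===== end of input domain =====

-- B replaces A's per-a-itemset inner scan over b with a single enumerate sweep over b
-- driving a pointer into a (objective: simpler).


-- ===== PORT A =====
-- Python set.issubset: every element of x is an element of y (sets carried as distinct-element lists)
def pvIssubset (x y : List Int) : Bool := x.all (fun e => y.contains e)

-- A's inner loop: `for index_b in range(idx, len(b))` with the mutable index_b_mem
-- threaded through; returns (index_b_mem, indices_b) after the loop / break.
-- (b.getD idx [] transcribes b[index_b]; idx < len b holds under the guard.)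
def pvInnerA (b : List (List Int)) (itemset_a : List Int) (mem idx : Nat) (acc : List Int) : Nat × List Int :=
  if h : idx < b.length then
    let mem' := if idx = b.length - 1 then b.length else mem
    let itemset_b := b.getD idx []
    if pvIssubset itemset_a itemset_b then (idx + 1, acc ++ [(idx : Int)])
    else pvInnerA b itemset_a mem' (idx + 1) acc
  else (mem, acc)
termination_by b.length - idx

-- A's outer loop over `enumerate(a)` (the index is unused) with the early return.
def pvOuterA (b : List (List Int)) (rest : List (List Int)) (mem : Nat) (acc : List Int) : List Int :=
  match rest with
  | [] => acc
  | itemset_a :: rest =>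
    let r := pvInnerA b itemset_a mem mem acc
    if r.1 = b.length then r.2 else pvOuterA b rest r.1 r.2

def subsequence_indices (a : List (List Int)) (b : List (List Int)) : List Int :=
  pvOuterA b a 0 []

-- ===== PORT B =====
-- B's single sweep: `for index_b, itemset_b in enumerate(b)` with pointer ai into a.
def pvGoB (a : List (List Int)) (rest : List (List Int)) (idx ai : Nat) (acc : List Int) : List Int :=
  match rest with
  | [] => acc
  | itemset_b :: rest =>
    if a.length ≤ ai then acc
    else if pvIssubset (a.getD ai []) itemset_b then pvGoB a rest (idx + 1) (ai + 1) (acc ++ [(idx : Int)])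
    else pvGoB a rest (idx + 1) ai acc

def subsequence_indices_alt (a : List (List Int)) (b : List (List Int)) : List Int :=
  pvGoB a b 0 0 []

-- ===== PRECONDITION & SPEC =====
def Spec_subsequence_indices (a : List (List Int)) (b : List (List Int)) (out : List Int) : Prop := out = subsequence_indices_alt a b
instance (a : List (List Int)) (b : List (List Int)) (out : List Int) : Decidable (Spec_subsequence_indices a b out) := by unfold Spec_subsequence_indices; infer_instance

-- ===== CLAIM (what is proved, stated in full; the proofs are below) =====
def Claim_equal_subsequence_indices : Prop := ∀ (a : List (List Int)) (b : List (List Int)), Dom_subsequence_indices a b → Spec_subsequence_indices a b (subsequence_indices a b)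

-- ===== LEMMAS AND PROOFS =====

-- Reference greedy matcher: both ports compute G a b 0 [].
def pvG (as bs : List (List Int)) (idx : Nat) (acc : List Int) : List Int :=
  match as, bs with
  | [], _ => acc
  | _ :: _, [] => acc
  | x :: as', y :: bs' =>
    if pvIssubset x y then pvG as' bs' (idx + 1) (acc ++ [(idx : Int)])
    else pvG (x :: as') bs' (idx + 1) acc

theorem pvGoB_eq_pvG (a : List (List Int)) (rest : List (List Int)) (idx ai : Nat) (acc : List Int) :
    pvGoB a rest idx ai acc = pvG (a.drop ai) rest idx acc := by
  induction rest generalizing idx ai acc with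
  | nil => cases a.drop ai with
    | nil => rfl
    | cons x t => rfl
  | cons y rest ih =>
    by_cases h : a.length ≤ ai
    · rw [List.drop_eq_nil_of_le h]
      simp [pvGoB, pvG, h]
    · have h' : ai < a.length := by omega
      have hd : a.drop ai = a[ai] :: a.drop (ai + 1) := List.drop_eq_getElem_cons h'
      have hg : a.getD ai [] = a[ai] := List.getD_eq_getElem a [] h'
      rw [hd]
      simp only [pvGoB, pvG, if_neg h, hg]
      split
      · exact ih _ _ _
      · rw [ih, hd]

theorem pvG_of_findIdx_none (x : List Int) (as l : List (List Int)) (idx : Nat) (acc : List Int)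
    (h : l.findIdx? (fun y => pvIssubset x y) = none) :
    pvG (x :: as) l idx acc = acc := by
  induction l generalizing idx with
  | nil => rfl
  | cons y t ih =>
    rw [List.findIdx?_cons] at h
    by_cases hxy : pvIssubset x y = true
    · simp [hxy] at h
    · simp [hxy] at h
      simp only [pvG, if_neg hxy]
      exact ih _ (List.findIdx?_eq_none_iff.mpr h)

theorem pvG_of_findIdx_some (x : List Int) (as l : List (List Int)) (idx o : Nat) (acc : List Int)
    (h : l.findIdx? (fun y => pvIssubset x y) = some o) :
    pvG (x :: as) l idx acc = pvG as (l.drop (o + 1)) (idx + o + 1) (acc ++ [((idx + o : Nat) : Int)]) := by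
  induction l generalizing idx o with
  | nil => simp at h
  | cons y t ih =>
    rw [List.findIdx?_cons] at h
    by_cases hxy : pvIssubset x y = true
    · simp [hxy] at h
      subst h
      simp [pvG, hxy]
    · simp [hxy] at h
      obtain ⟨o', ho', ho2⟩ := h
      subst ho2
      simp only [pvG, if_neg hxy, List.drop_succ_cons]
      rw [ih _ _ ho']
      have e1 : idx + 1 + o' + 1 = idx + (o' + 1) + 1 := by omega
      have e2 : idx + 1 + o' = idx + (o' + 1) := by omega
      rw [e1, e2]

theorem findIdx?_lt_length {α : Type} {p : α → Bool} {l : List α} {o : Nat}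
    (h : l.findIdx? p = some o) : o < l.length :=
  (List.findIdx?_eq_some_iff_findIdx_eq.mp h).1

theorem pvInnerA_spec (b : List (List Int)) (x : List Int) (mem idx : Nat) (acc : List Int)
    (hle : idx ≤ b.length) (hmem : idx = b.length → mem = b.length) :
    pvInnerA b x mem idx acc =
      match (b.drop idx).findIdx? (fun y => pvIssubset x y) with
      | some o => (idx + o + 1, acc ++ [((idx + o : Nat) : Int)])
      | none => (b.length, acc) := by
  by_cases h : idx < b.length
  · have hd : b.drop idx = b[idx] :: b.drop (idx + 1) := List.drop_eq_getElem_cons h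
    have hg : b.getD idx [] = b[idx] := List.getD_eq_getElem b [] h
    rw [hd, List.findIdx?_cons]
    by_cases hxy : pvIssubset x b[idx] = true
    · simp only [hxy]
      rw [pvInnerA]
      simp [h, hxy]
    · simp only [hxy]
      rw [pvInnerA]
      simp only [h, dif_pos, hg, hxy, if_neg, Bool.false_eq_true, not_false_iff]
      have h1 : idx + 1 ≤ b.length := by omega
      have h2 : idx + 1 = b.length → (if idx = b.length - 1 then b.length else mem) = b.length := by
        intro he
        have hl : idx = b.length - 1 := by omega
        exact if_pos hl
      rw [pvInnerA_spec b x (if idx = b.length - 1 then b.length else mem) (idx + 1) acc h1 h2]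
      cases hf : (b.drop (idx + 1)).findIdx? (fun y => pvIssubset x y) with
      | none => simp
      | some o' =>
        simp only [Option.map_some]
        have e2 : idx + 1 + o' = idx + (o' + 1) := by omega
        rw [e2]
  · have he : idx = b.length := by omega
    rw [pvInnerA]
    simp [he, List.drop_length, hmem he]
termination_by b.length - idx

theorem pvOuterA_eq_pvG (b : List (List Int)) (rest : List (List Int)) (mem : Nat) (acc : List Int)
    (hle : mem ≤ b.length) :
    pvOuterA b rest mem acc = pvG rest (b.drop mem) mem acc := by
  induction rest generalizing mem acc with
  | nil => cases b.drop mem with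
    | nil => rfl
    | cons y t => rfl
  | cons x rest ih =>
    rw [pvOuterA]
    rw [pvInnerA_spec b x mem mem acc hle (fun h => h)]
    cases hf : (b.drop mem).findIdx? (fun y => pvIssubset x y) with
    | none =>
      simp [pvG_of_findIdx_none x rest (b.drop mem) mem acc hf]
    | some o =>
      have ho : o < b.length - mem := by
        have := findIdx?_lt_length hf
        simpa [List.length_drop] using this
      rw [pvG_of_findIdx_some x rest _ mem o acc hf]
      simp only [List.drop_drop]
      have harg : mem + (o + 1) = mem + o + 1 := by omega
      rw [harg]
      by_cases hend : mem + o + 1 = b.length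
      · rw [if_pos (by omega)]
        rw [List.drop_eq_nil_of_le (show b.length ≤ mem + o + 1 by omega)]
        cases rest <;> rfl
      · rw [if_neg (by omega)]
        exact ih (mem + o + 1) _ (by omega)

-- ===== VERDICT (by name: the statement is the Claim_ definition above) =====
theorem subsequence_indices_spec : Claim_equal_subsequence_indices := by
  intro a b _
  unfold Spec_subsequence_indices subsequence_indices subsequence_indices_alt
  rw [pvOuterA_eq_pvG b a 0 [] (Nat.zero_le _), pvGoB_eq_pvG]
  simp
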